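-- pv_equiv track=rewrite | github.com/fan48868/Odysseia-ShenSuoNiangFAN | src/chat/cogs/memory_commands.py | _split_memory_summary_into_pages
-- ===== SOURCE A (Python) =====
-- _MEMORY_PAGE_CHAR_LIMIT = 4000
--
-- def _split_memory_summary_into_pages(
--     summary: str,
--     max_chars: int = _MEMORY_PAGE_CHAR_LIMIT,
-- ) -> list[str]:
--     if max_chars <= 0:
--         raise ValueError("分页长度必须大于 0。")
--
--     if summary == "":
--         return [""]
--
--     pages: list[str] = []
--     current_chunks: list[str] = []
--     current_len = 0
--
--     for segment in summary.splitlines(keepends=True) or [summary]: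
--         if len(segment) <= max_chars:
--             if current_len + len(segment) <= max_chars:
--                 current_chunks.append(segment)
--                 current_len += len(segment)
--             else:
--                 if current_chunks:
--                     pages.append("".join(current_chunks))
--                 current_chunks = [segment]
--                 current_len = len(segment)
--             continue
--
--         if current_chunks:
--             pages.append("".join(current_chunks))
--             current_chunks = []
--             current_len = 0
--
--         start = 0
--         while start < len(segment):
--             chunk = segment[start : start + max_chars]
--             start += max_chars
--
--             if len(chunk) == max_chars:
--                 pages.append(chunk)
--             else:
--                 current_chunks = [chunk]
--                 current_len = len(chunk)
--
--     if current_chunks or not pages: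
--         pages.append("".join(current_chunks))
--
--     return pages
-- ===== SOURCE B (Python) =====
-- _MEMORY_PAGE_CHAR_LIMIT = 4000
--
--
-- def _split_memory_summary_into_pages(
--     summary: str,
--     max_chars: int = _MEMORY_PAGE_CHAR_LIMIT,
-- ) -> list[str]:
--     if max_chars <= 0:
--         raise ValueError("分页长度必须大于 0。")
--
--     # Work stack of pending segments, top at the end.
--     stack = list(reversed(summary.splitlines(keepends=True) or [summary]))
--     pages: list[str] = []
--     while stack:
--         seg = stack.pop()
--         if len(seg) > max_chars:
--             # Emit one full-width page and push the remainder back.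
--             pages.append(seg[:max_chars])
--             stack.append(seg[max_chars:])
--         else:
--             # Greedily extend this page with following segments that fit.
--             while stack and len(seg) + len(stack[-1]) <= max_chars:
--                 seg += stack.pop()
--             pages.append(seg)
--     return pages
-- ===== Notes on version B (the rewrite author's own statement) =====
-- stated objective: alternative
-- what changed: B replaces A's single segment loop with three pieces of mutable page-buffer state (pages, current_chunks, current_len) and an inner chunk-slicing while loop by a work-stack algorithm: segments are pushed on a stack, an over-long top emits one full page and pushes its remainder back, and a fitting top greedily absorbs following stack entries into one page, so no cross-iteration buffer state exists.
import Mathlib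
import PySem

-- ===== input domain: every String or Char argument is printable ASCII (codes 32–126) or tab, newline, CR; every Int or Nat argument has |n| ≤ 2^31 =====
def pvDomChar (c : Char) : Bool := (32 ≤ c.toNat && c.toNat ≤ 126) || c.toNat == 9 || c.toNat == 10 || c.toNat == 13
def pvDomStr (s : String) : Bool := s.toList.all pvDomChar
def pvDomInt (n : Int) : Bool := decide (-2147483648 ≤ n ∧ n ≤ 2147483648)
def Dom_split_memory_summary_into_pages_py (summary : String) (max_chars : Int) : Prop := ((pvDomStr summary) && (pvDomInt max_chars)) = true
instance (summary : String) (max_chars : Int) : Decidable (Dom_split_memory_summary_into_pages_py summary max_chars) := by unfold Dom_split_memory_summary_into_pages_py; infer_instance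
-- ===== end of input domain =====

-- B replaces A's single segment loop with three pieces of cross-iteration buffer state
-- (pages, current_chunks, current_len) and an inner chunk-slicing while loop by a
-- work-stack algorithm: an over-long top segment emits one full page and pushes its
-- remainder back, a fitting top greedily absorbs following stack entries into one page.

-- ===== PORT A =====
-- summary.splitlines(keepends=True), hand-ported (PySem has no keepends form); exact on
-- the Dom character set, whose only line breaks are '\n', '\r' and the pair '\r\n'.
def pvSplitKeepGo (acc : List Char) (cs : List Char) : List (List Char) :=
  match cs with
  | [] => if acc = [] then [] else [acc]
  | c :: rest =>
    if c = '\n' then (acc ++ [c]) :: pvSplitKeepGo [] rest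
    else if c = '\r' then
      if rest.head? = some '\n' then (acc ++ ['\r', '\n']) :: pvSplitKeepGo [] rest.tail
      else (acc ++ [c]) :: pvSplitKeepGo [] rest
    else pvSplitKeepGo (acc ++ [c]) rest
termination_by cs.length
decreasing_by all_goals (simp only [List.length_cons, List.length_tail]; omega)

-- summary.splitlines(keepends=True) or [summary]
def pvSegs (cs : List Char) : List (List Char) :=
  let L := pvSplitKeepGo [] cs
  if L = [] then [cs] else L

-- A's inner while-loop over one over-long segment: chunk = segment[start:start+max_chars],
-- taken on the remaining suffix (a slice with nonnegative bounds is take after drop); full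
-- chunks are appended directly to pages, a short trailing chunk becomes the new buffer.
-- m = max_chars.toNat; the 'm = 0' branch is a totality guard only (Pre_ gives max_chars > 0).
def pvSliceA (m : Nat) (pages : List (List Char)) (rest : List Char) :
    List (List Char) × List (List Char) × Int :=
  if hr : rest = [] then (pages, [], 0)
  else if hm : m = 0 then (pages, [], 0)
  else
    let chunk := rest.take m
    if chunk.length = m then pvSliceA m (pages ++ [chunk]) (rest.drop m)
    else (pages, [chunk], (chunk.length : Int))
termination_by rest.length
decreasing_by
  have : 0 < rest.length := List.length_pos_iff.mpr hr
  simp only [List.length_drop]; omega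

-- the body of A's 'for segment in …' loop, acting on (pages, current_chunks, current_len);
-- ''.join(current_chunks) is List.flatten
def pvStepA (max_chars : Int) (m : Nat)
    (st : List (List Char) × List (List Char) × Int) (seg : List Char) :
    List (List Char) × List (List Char) × Int :=
  let (pages, cur, clen) := st
  if (seg.length : Int) ≤ max_chars then
    if clen + seg.length ≤ max_chars then (pages, cur ++ [seg], clen + seg.length)
    else ((if cur = [] then pages else pages ++ [cur.flatten]), [seg], (seg.length : Int))
  else
    pvSliceA m (if cur = [] then pages else pages ++ [cur.flatten]) seg

def split_memory_summary_into_pages_py (summary : String) (max_chars : Int) : List String :=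
  if summary = "" then [""]
  else
    let r := (pvSegs summary.toList).foldl (pvStepA max_chars max_chars.toNat) ([], [], 0)
    let pages := if r.2.1 ≠ [] ∨ r.1 = [] then r.1 ++ [r.2.1.flatten] else r.1
    pages.map (fun cs => String.ofList cs)

-- ===== PORT B =====
-- B's summary.splitlines(keepends=True), hand-ported as a front-building recursion
-- (PySem has no keepends form); exact on the Dom character set, whose only line breaks
-- are '\n', '\r' and the pair '\r\n'.
def pvLines : List Char → List (List Char)
  | [] => []
  | '\r' :: '\n' :: rest => ['\r', '\n'] :: pvLines rest
  | c :: rest =>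
    if c = '\n' ∨ c = '\r' then [c] :: pvLines rest
    else
      match pvLines rest with
      | [] => [[c]]
      | l :: ls => (c :: l) :: ls

-- measure used for the termination of B's while loop (total characters + stack entries)
def pvMu (l : List (List Char)) : Nat := (l.map List.length).sum + l.length

-- B's inner while loop: absorb following stack entries into the page while they fit
def pvAbsorb (m : Nat) (page : List Char) (stack : List (List Char)) :
    List Char × List (List Char) :=
  match stack with
  | [] => (page, [])
  | t :: r =>
    if page.length + t.length ≤ m then pvAbsorb m (page ++ t) r else (page, t :: r)

-- termination helper for pvLoop, cited in its decreasing_by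
theorem pvAbsorb_mu (m : Nat) (page : List Char) (stack : List (List Char)) :
    pvMu (pvAbsorb m page stack).2 ≤ pvMu stack := by
  induction stack generalizing page with
  | nil => simp [pvAbsorb, pvMu]
  | cons t r IH =>
    simp only [pvAbsorb]
    split
    · have := IH (page ++ t)
      simp [pvMu] at this ⊢; omega
    · simp

-- B's outer while loop; the stack top is the list head (the Python stack is reversed with
-- pop() from the end, which is the same traversal).  The 'm = 0' branch is a totality
-- guard only (Pre_ gives max_chars > 0).
def pvLoop (m : Nat) (stack : List (List Char)) (pages : List (List Char)) :
    List (List Char) :=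
  match stack with
  | [] => pages
  | seg :: rest =>
    if _hm : m = 0 then pages
    else if m < seg.length then
      pvLoop m (seg.drop m :: rest) (pages ++ [seg.take m])
    else
      pvLoop m (pvAbsorb m seg rest).2 (pages ++ [(pvAbsorb m seg rest).1])
termination_by pvMu stack
decreasing_by
  · simp [pvMu]; omega
  · have := pvAbsorb_mu m seg rest
    simp [pvMu] at this ⊢; omega

def split_memory_summary_into_pages_py_alt (summary : String) (max_chars : Int) : List String :=
  let L := pvLines summary.toList
  let stack := if L = [] then [summary.toList] else L
  (pvLoop max_chars.toNat stack []).map (fun cs => String.ofList cs)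

-- ===== PRECONDITION & SPEC =====
-- Python raises ValueError exactly when max_chars <= 0.
def Pre_split_memory_summary_into_pages_py (summary : String) (max_chars : Int) : Prop :=
  0 < max_chars
instance (summary : String) (max_chars : Int) : Decidable (Pre_split_memory_summary_into_pages_py summary max_chars) := by unfold Pre_split_memory_summary_into_pages_py; infer_instance

def pvWitness_split_memory_summary_into_pages_py : String × Int := ("alpha\nbeta gamma\r\ndelta", 7)

def Spec_split_memory_summary_into_pages_py (summary : String) (max_chars : Int) (out : List String) : Prop := out = split_memory_summary_into_pages_py_alt summary max_chars
instance (summary : String) (max_chars : Int) (out : List String) : Decidable (Spec_split_memory_summary_into_pages_py summary max_chars out) := by unfold Spec_split_memory_summary_into_pages_py; infer_instance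

-- ===== CLAIM (what is proved, stated in full; the proofs are below) =====
def Claim_equal_split_memory_summary_into_pages_py : Prop := ∀ (summary : String) (max_chars : Int), Dom_split_memory_summary_into_pages_py summary max_chars → Pre_split_memory_summary_into_pages_py summary max_chars → Spec_split_memory_summary_into_pages_py summary max_chars (split_memory_summary_into_pages_py summary max_chars)

-- ===== LEMMAS AND PROOFS =====

-- the common abstract page stream both loops compute: greedy line packing with on-the-fly
-- slicing of over-long segments, carrying the pending page text 'cur'
def pvCore (m : Nat) (cur : List Char) (l : List (List Char)) : List (List Char) :=
  match l with
  | [] => if cur = [] then [] else [cur]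
  | seg :: rest =>
    if _hm : m = 0 then []
    else if seg.length ≤ m then
      if cur.length + seg.length ≤ m then pvCore m (cur ++ seg) rest
      else cur :: pvCore m seg rest
    else (if cur = [] then [] else [cur]) ++ (seg.take m :: pvCore m [] (seg.drop m :: rest))
termination_by pvMu l
decreasing_by
  · simp [pvMu]; omega
  · simp [pvMu]; omega
  · simp [pvMu]; omega

theorem pvCore_nil (m : Nat) (cur : List Char) :
    pvCore m cur [] = if cur = [] then [] else [cur] := by
  rw [pvCore]

theorem pvCore_cons (m : Nat) (hm : m ≠ 0) (cur seg : List Char) (rest : List (List Char)) :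
    pvCore m cur (seg :: rest)
      = if seg.length ≤ m then
          (if cur.length + seg.length ≤ m then pvCore m (cur ++ seg) rest
           else cur :: pvCore m seg rest)
        else (if cur = [] then [] else [cur]) ++ (seg.take m :: pvCore m [] (seg.drop m :: rest)) := by
  rw [pvCore]; simp [hm]

-- unfolding lemmas for B's splitter
theorem pvLines_lf (rest : List Char) : pvLines ('\n' :: rest) = ['\n'] :: pvLines rest := by
  simp [pvLines]

theorem pvLines_crlf (rest : List Char) :
    pvLines ('\r' :: '\n' :: rest) = ['\r','\n'] :: pvLines rest := by
  simp [pvLines]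

theorem pvLines_cr (rest : List Char) (h : rest.head? ≠ some '\n') :
    pvLines ('\r' :: rest) = ['\r'] :: pvLines rest := by
  cases rest with
  | nil => simp [pvLines]
  | cons b t =>
    have hb : b ≠ '\n' := by simpa using h
    simp [pvLines, hb]

theorem pvLines_other (c : Char) (rest : List Char) (h1 : c ≠ '\n') (h2 : c ≠ '\r') :
    pvLines (c :: rest) = (match pvLines rest with
      | [] => [[c]]
      | l :: ls => (c :: l) :: ls) := by
  simp [pvLines, h1, h2]

-- prepending pending text to the first line
def pvConsAcc (acc : List Char) (L : List (List Char)) : List (List Char) :=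
  if acc = [] then L else
    match L with
    | [] => [acc]
    | l :: ls => (acc ++ l) :: ls

theorem pvSplitKeepGo_eq_consAcc (cs acc : List Char) :
    pvSplitKeepGo acc cs = pvConsAcc acc (pvLines cs) := by
  fun_induction pvSplitKeepGo acc cs with
  | case1 => simp [pvLines, pvConsAcc]
  | case2 acc ha => simp [pvLines, pvConsAcc, ha]
  | case3 acc rest ih =>
    rw [pvLines_lf, ih]
    by_cases ha : acc = [] <;> simp [pvConsAcc, ha]
  | case4 acc rest hh _ ih =>
    obtain ⟨t, rfl⟩ : ∃ t, rest = '\n' :: t := by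
      cases rest with
      | nil => simp at hh
      | cons b t => simp at hh; exact ⟨t, by simp [hh]⟩
    rw [pvLines_crlf]
    simp only [List.tail_cons] at ih ⊢
    rw [ih]
    by_cases ha : acc = [] <;> simp [pvConsAcc, ha]
  | case5 acc rest hh _ ih =>
    rw [pvLines_cr rest hh, ih]
    by_cases ha : acc = [] <;> simp [pvConsAcc, ha]
  | case6 acc c rest h1 h2 ih =>
    rw [ih, pvLines_other c rest h1 h2]
    cases hL : pvLines rest with
    | nil => by_cases ha : acc = [] <;> simp [pvConsAcc, ha]
    | cons l ls => by_cases ha : acc = [] <;> simp [pvConsAcc, ha]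

theorem pvSplitKeepGo_eq_pvLines (cs : List Char) :
    pvSplitKeepGo [] cs = pvLines cs := by
  rw [pvSplitKeepGo_eq_consAcc]; simp [pvConsAcc]

-- every segment produced by splitlines(keepends=True) is nonempty
theorem pvSplitKeepGo_ne_nil (acc cs : List Char) :
    ∀ x ∈ pvSplitKeepGo acc cs, x ≠ [] := by
  fun_induction pvSplitKeepGo acc cs <;> intro x hx <;> simp_all <;>
    rcases hx with h | h <;> simp_all

theorem pvSegs_ne_nil (cs : List Char) (h : cs ≠ []) :
    ∀ x ∈ pvSegs cs, x ≠ [] := by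
  intro x hx
  simp only [pvSegs] at hx
  split at hx
  · simp at hx; subst hx; exact h
  · exact pvSplitKeepGo_ne_nil [] cs x hx

-- a nonempty chunk list of nonempty chunks has nonempty flatten
theorem pvFlatten_ne_nil (cur : List (List Char)) (hcur : ∀ c ∈ cur, c ≠ []) (hc : cur ≠ []) :
    cur.flatten ≠ [] := by
  intro h
  rw [List.flatten_eq_nil_iff] at h
  cases cur with
  | nil => exact hc rfl
  | cons x xs => exact hcur x List.mem_cons_self (h x List.mem_cons_self)

-- ---- B side: pvLoop computes pvCore ----

theorem pvAbsorb_mem (m : Nat) (page : List Char) (stack : List (List Char)) :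
    ∀ x ∈ (pvAbsorb m page stack).2, x ∈ stack := by
  induction stack generalizing page with
  | nil => simp [pvAbsorb]
  | cons t r IH =>
    intro x hx
    simp only [pvAbsorb] at hx
    split at hx
    · exact List.mem_cons_of_mem _ (IH _ x hx)
    · simpa using hx

theorem pvAbsorb_core (m : Nat) (hm : m ≠ 0) (stack : List (List Char)) (page : List Char)
    (hp : page ≠ []) :
    pvCore m page stack = (pvAbsorb m page stack).1 :: pvCore m [] (pvAbsorb m page stack).2 := by
  induction stack generalizing page with
  | nil => simp [pvAbsorb, pvCore_nil, hp]
  | cons t r IH =>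
    rw [pvCore_cons m hm]
    simp only [pvAbsorb]
    by_cases hfit : page.length + t.length ≤ m
    · have ht : t.length ≤ m := by omega
      simp only [if_pos hfit, if_pos ht]
      exact IH (page ++ t) (by simp [hp])
    · by_cases ht : t.length ≤ m
      · simp only [if_neg hfit, if_pos ht]
        conv_rhs => rw [pvCore_cons m hm]
        simp [ht]
      · simp only [if_neg hfit, if_neg ht, if_neg hp]
        conv_rhs => rw [pvCore_cons m hm]
        simp [ht]

theorem pvLoop_core (m : Nat) (hm : m ≠ 0) (stack : List (List Char))
    (hne : ∀ x ∈ stack, x ≠ []) (pages : List (List Char)) :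
    pvLoop m stack pages = pages ++ pvCore m [] stack := by
  induction hn : pvMu stack using Nat.strong_induction_on generalizing stack pages with
  | _ n IH =>
  subst hn
  cases stack with
  | nil => simp [pvLoop, pvCore_nil]
  | cons seg rest =>
    have hseg : seg ≠ [] := hne seg List.mem_cons_self
    have hrest : ∀ x ∈ rest, x ≠ [] := fun x hx => hne x (List.mem_cons_of_mem _ hx)
    rw [pvLoop]
    simp only [dif_neg hm]
    by_cases hlen : m < seg.length
    · have hlt : pvMu (seg.drop m :: rest) < pvMu (seg :: rest) := by
        simp [pvMu]; omega
      have hne' : ∀ x ∈ (seg.drop m :: rest), x ≠ [] := by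
        intro x hx
        rcases List.mem_cons.mp hx with h | h
        · subst h; intro h'; rw [List.drop_eq_nil_iff] at h'; omega
        · exact hrest x h
      rw [if_pos hlen, IH _ hlt _ hne' _ rfl]
      conv_rhs => rw [pvCore_cons m hm]
      have h2 : ¬ seg.length ≤ m := by omega
      simp [h2]
    · rw [if_neg hlen, pvCore_cons m hm]
      have hsl : seg.length ≤ m := by omega
      have h0 : ([] : List Char).length + seg.length ≤ m := by simp; omega
      simp only [if_pos hsl, if_pos h0, List.nil_append]
      rw [pvAbsorb_core m hm rest seg hseg]
      have hmu : pvMu (pvAbsorb m seg rest).2 < pvMu (seg :: rest) := by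
        have := pvAbsorb_mu m seg rest
        simp [pvMu] at this ⊢; omega
      have hne2 : ∀ x ∈ (pvAbsorb m seg rest).2, x ≠ [] :=
        fun x hx => hrest x (pvAbsorb_mem m seg rest x hx)
      rw [IH _ hmu _ hne2 _ rfl]
      simp

-- ---- A side: the fold computes pvCore ----

-- the final flush as A performs it when at least one page was already emitted
def pvFlushA (st : List (List Char) × List (List Char) × Int) : List (List Char) :=
  if st.2.1 ≠ [] then st.1 ++ [st.2.1.flatten] else st.1

-- a pending page of exactly m characters is closed either way
theorem pvCore_full (m : Nat) (hm : m ≠ 0) (c : List Char) (hc : c.length = m)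
    (rest : List (List Char)) (hne : ∀ x ∈ rest, x ≠ []) :
    pvCore m c rest = c :: pvCore m [] rest := by
  have hcne : c ≠ [] := by intro h; subst h; simp at hc; omega
  cases rest with
  | nil => simp [pvCore_nil, hcne]
  | cons s r =>
    have hs : s ≠ [] := hne s List.mem_cons_self
    have hs0 : s.length ≠ 0 := by simpa using hs
    rw [pvCore_cons m hm]
    conv_rhs => rw [pvCore_cons m hm]
    by_cases hsl : s.length ≤ m
    · have hnf : ¬ (c.length + s.length ≤ m) := by omega
      simp [hsl, hnf]
    · simp [hsl, hcne]

theorem pvSliceA_nil (m : Nat) (pages : List (List Char)) :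
    pvSliceA m pages [] = (pages, [], 0) := by
  rw [pvSliceA]; simp

theorem pvAFold (mc : Int) (m : Nat) (hmc : (m : Int) = mc) (hm : m ≠ 0) (n : Nat) :
    (∀ seg rest, pvMu (seg :: rest) = n → seg ≠ [] → (∀ x ∈ rest, x ≠ []) →
      ∀ P, pvFlushA (rest.foldl (pvStepA mc m) (pvSliceA m P seg))
            = P ++ pvCore m [] (seg :: rest))
    ∧ (∀ segs, pvMu segs = n → (∀ x ∈ segs, x ≠ []) →
      ∀ pages cur, (∀ c ∈ cur, c ≠ []) →
        pvFlushA (segs.foldl (pvStepA mc m) (pages, cur, (cur.flatten.length : Int)))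
          = pages ++ pvCore m cur.flatten segs) := by
  induction n using Nat.strong_induction_on with
  | _ n IH =>
  have hP1 : ∀ seg rest, pvMu (seg :: rest) = n → seg ≠ [] → (∀ x ∈ rest, x ≠ []) →
      ∀ P, pvFlushA (rest.foldl (pvStepA mc m) (pvSliceA m P seg))
            = P ++ pvCore m [] (seg :: rest) := by
    intro seg rest hn hseg hrest P
    have hsegpos : seg.length ≠ 0 := by simpa using hseg
    rw [pvSliceA]
    simp only [dif_neg hseg, dif_neg hm]
    rcases lt_trichotomy seg.length m with hlt | heq | hgt
    · -- short segment: the single chunk is the whole segment and becomes the buffer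
      have htk : seg.take m = seg := List.take_of_length_le hlt.le
      have hnem : ¬ seg.length = m := by omega
      simp only [htk]
      rw [if_neg hnem]
      have hmu : pvMu rest < n := by subst hn; simp [pvMu]; omega
      have h2 := (IH _ hmu).2 rest rfl hrest P [seg] (by simp [hseg])
      simp only [List.flatten_cons, List.flatten_nil, List.append_nil] at h2
      rw [h2]
      conv_rhs => rw [pvCore_cons m hm]
      have hsl : seg.length ≤ m := hlt.le
      simp [hsl]
    · -- exact-width segment: one full page is emitted, buffer left empty
      have hdrop : seg.drop m = [] := by rw [List.drop_eq_nil_iff]; omega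
      have htk : seg.take m = seg := List.take_of_length_le heq.le
      simp only [htk, hdrop, pvSliceA_nil]
      rw [if_pos heq]
      have hmu : pvMu rest < n := by subst hn; simp [pvMu]; omega
      have h2 := (IH _ hmu).2 rest rfl hrest (P ++ [seg]) [] (by simp)
      simp only [List.flatten_nil, List.length_nil, Nat.cast_zero] at h2
      rw [h2]
      conv_rhs => rw [pvCore_cons m hm]
      have hsl : seg.length ≤ m := heq.le
      have h0 : ([] : List Char).length + seg.length ≤ m := by simp [hsl]
      simp only [if_pos hsl, if_pos h0, List.nil_append]
      rw [pvCore_full m hm seg heq rest hrest]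
      simp
    · -- over-long segment: emit one full chunk and continue slicing
      have hfull : (seg.take m).length = m := by simp; omega
      have hdrop : seg.drop m ≠ [] := by rw [Ne, List.drop_eq_nil_iff]; omega
      simp only [if_pos hfull]
      have hmu : pvMu (seg.drop m :: rest) < n := by subst hn; simp [pvMu]; omega
      have h1 := (IH _ hmu).1 (seg.drop m) rest rfl hdrop hrest (P ++ [seg.take m])
      rw [h1]
      conv_rhs => rw [pvCore_cons m hm]
      have hngt : ¬ seg.length ≤ m := by omega
      simp [hngt]
  refine ⟨hP1, ?_⟩
  intro segs hn hne pages cur hcur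
  cases segs with
  | nil =>
    simp only [List.foldl_nil, pvCore_nil, pvFlushA]
    by_cases hc : cur = []
    · subst hc; simp
    · have hfl := pvFlatten_ne_nil cur hcur hc
      simp [hc, hfl]
  | cons seg rest =>
    have hseg : seg ≠ [] := hne seg List.mem_cons_self
    have hrest : ∀ x ∈ rest, x ≠ [] := fun x hx => hne x (List.mem_cons_of_mem _ hx)
    rw [List.foldl_cons]
    by_cases hs : ((seg.length : Int) ≤ mc)
    · have hsl : seg.length ≤ m := by omega
      by_cases hfit : ((cur.flatten.length : Int) + (seg.length : Int) ≤ mc)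
      · have hfitn : cur.flatten.length + seg.length ≤ m := by omega
        simp only [pvStepA, if_pos hs, if_pos hfit]
        have hst : ((cur.flatten.length : Int) + (seg.length : Int))
            = (((cur ++ [seg]).flatten).length : Int) := by
          simp [List.flatten_append]
        rw [hst]
        have hmu : pvMu rest < n := by subst hn; simp [pvMu]; omega
        have hcur' : ∀ c ∈ cur ++ [seg], c ≠ [] := by
          intro c hc
          rcases List.mem_append.mp hc with h | h
          · exact hcur c h
          · simp at h; subst h; exact hseg
        have h2 := (IH _ hmu).2 rest rfl hrest pages (cur ++ [seg]) hcur'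
        rw [h2]
        conv_rhs => rw [pvCore_cons m hm]
        have hflt : cur.flatten.length = (List.map List.length cur).sum := by simp
        have hsum : (List.map List.length cur).sum + seg.length ≤ m := by omega
        simp [hsl, hsum, List.flatten_append]
      · have hc : cur ≠ [] := by
          intro h; subst h
          simp at hfit
          omega
        have hfitn : ¬ (cur.flatten.length + seg.length ≤ m) := by omega
        simp only [pvStepA, if_pos hs, if_neg hfit, if_neg hc]
        have hmu : pvMu rest < n := by subst hn; simp [pvMu]; omega
        have h2 := (IH _ hmu).2 rest rfl hrest (pages ++ [cur.flatten]) [seg] (by simp [hseg])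
        simp only [List.flatten_cons, List.flatten_nil, List.append_nil] at h2
        rw [h2]
        conv_rhs => rw [pvCore_cons m hm]
        have hflt : cur.flatten.length = (List.map List.length cur).sum := by simp
        have hsum : ¬ ((List.map List.length cur).sum + seg.length ≤ m) := by omega
        simp [hsl, hsum]
    · -- over-long segment
      have hngt : ¬ seg.length ≤ m := by omega
      simp only [pvStepA, if_neg hs]
      have h1 := hP1 seg rest hn hseg hrest (if cur = [] then pages else pages ++ [cur.flatten])
      rw [h1]
      conv_lhs => rw [pvCore_cons m hm]
      conv_rhs => rw [pvCore_cons m hm]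
      simp only [if_neg hngt]
      by_cases hc : cur = []
      · subst hc; simp
      · have hfl := pvFlatten_ne_nil cur hcur hc
        simp [hc, hfl]

theorem pvCore_ne_nil (m : Nat) (hm : m ≠ 0) (segs : List (List Char)) (cur : List Char)
    (hne : ∀ x ∈ segs, x ≠ []) (hor : cur ≠ [] ∨ segs ≠ []) :
    pvCore m cur segs ≠ [] := by
  induction hn : pvMu segs using Nat.strong_induction_on generalizing segs cur with
  | _ n IH =>
  subst hn
  cases segs with
  | nil =>
    rcases hor with h | h
    · simp [pvCore_nil, h]
    · exact absurd rfl h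
  | cons seg rest =>
    have hseg : seg ≠ [] := hne seg List.mem_cons_self
    have hrest : ∀ x ∈ rest, x ≠ [] := fun x hx => hne x (List.mem_cons_of_mem _ hx)
    rw [pvCore_cons m hm]
    by_cases hsl : seg.length ≤ m
    · by_cases hfit : cur.length + seg.length ≤ m
      · simp only [if_pos hsl, if_pos hfit]
        exact IH _ (by simp [pvMu]; omega) _ _ hrest (Or.inl (by simp [hseg])) rfl
      · simp [hsl, hfit]
    · simp [hsl]

-- ===== VERDICT (by name: the statement is the Claim_ definition above) =====
theorem split_memory_summary_into_pages_py_spec : Claim_equal_split_memory_summary_into_pages_py := by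
  intro s mc _ hpre
  unfold Spec_split_memory_summary_into_pages_py
  have hpre' : (0 : Int) < mc := hpre
  have hm : mc.toNat ≠ 0 := by omega
  have hmc : ((mc.toNat : Nat) : Int) = mc := Int.toNat_of_nonneg hpre'.le
  by_cases hs : s = ""
  · subst hs
    have hA : split_memory_summary_into_pages_py "" mc = [""] := by
      simp [split_memory_summary_into_pages_py]
    have hloop : pvLoop mc.toNat [[]] [] = [[]] := by
      rw [pvLoop.eq_def]
      simp [hm, pvAbsorb, pvLoop]
    have hB : split_memory_summary_into_pages_py_alt "" mc = [""] := by
      simp only [split_memory_summary_into_pages_py_alt]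
      have h0 : ("" : String).toList = [] := rfl
      rw [h0]
      have h1 : pvLines [] = [] := rfl
      rw [h1]
      simp [hloop]
    rw [hA, hB]
  · have htl : s.toList ≠ [] := fun h => hs (String.toList_eq_nil_iff.mp h)
    simp only [split_memory_summary_into_pages_py, split_memory_summary_into_pages_py_alt,
      if_neg hs]
    rw [← pvSplitKeepGo_eq_pvLines]
    have hstack : (if pvSplitKeepGo [] s.toList = [] then [s.toList] else pvSplitKeepGo [] s.toList)
        = pvSegs s.toList := by
      simp [pvSegs]
    rw [hstack]
    have hne := pvSegs_ne_nil s.toList htl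
    have hsegne : pvSegs s.toList ≠ [] := by
      intro hempty
      rw [hempty] at hstack
      split at hstack <;> simp_all
    rw [pvLoop_core mc.toNat hm _ hne []]
    simp only [List.nil_append]
    have h2 := (pvAFold mc mc.toNat hmc hm (pvMu (pvSegs s.toList))).2 (pvSegs s.toList) rfl hne
      ([] : List (List Char)) ([] : List (List Char)) (by simp)
    simp only [List.flatten_nil, List.length_nil, Nat.cast_zero, List.nil_append] at h2
    have hX := pvCore_ne_nil mc.toNat hm (pvSegs s.toList) [] hne (Or.inr hsegne)
    congr 1
    generalize hgen : (pvSegs s.toList).foldl (pvStepA mc mc.toNat) ([], [], 0) = r at h2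
    by_cases hcur : r.2.1 = []
    · simp [pvFlushA, hcur] at h2
      simp [hcur, h2]
      exact hX
    · simp [pvFlushA, hcur] at h2
      simp [hcur, h2]
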